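-- pv_equiv track=rewrite | github.com/nixternal/CodingChallenges | Codyssi/2025/11.py | find_smallest_base
-- ===== SOURCE A (Python) =====
-- def convert_to_base_n(number, base):
--     """
--     Convert a base-10 number to a given base.
--
--     Args:
--     number (int): The number in base-10
--     base (int): The target base
--
--     Returns:
--     str: The number in the target base representation
--     """
--
--     if base < 2 or base > 100_000:  # Reasonable upper limit
--         raise ValueError(f"Base must be between 2 and 100_000, got {base}")
--
--     # Dynamic digit generation for any base
--     def generate_digit(value):
--         """More explicit and slightly more readable digit generation."""
--         digits = {
--             range(0, 10): lambda v: str(v),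
--             range(10, 36): lambda v: chr(v - 10 + ord('A')),
--             range(36, 62): lambda v: chr(v - 36 + ord('a')),
--             range(62, 68): lambda v: '!@#$%^'[v - 62]
--         }
--
--         for digit_range, digit_func in digits.items():
--             if value in digit_range:
--                 return digit_func(value)
--
--         return chr(value)
--
--     # Handle 0 as a special case
--     if number == 0:
--         return '0'
--
--     # Convert to target base
--     base_n_digits = []
--
--     while number > 0:
--         # Get the remainder (which becomes the next digit)
--         remainder = number % base
--         base_n_digits.append(generate_digit(remainder))
--
--         # Integer division to move to the next digit
--         number //= base
--
--     # Reverse the digits to get the correct representation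
--     return ''.join(reversed(base_n_digits))
--
-- def find_smallest_base(total_sum: int) -> int:
--     """
--     Find the smallest base that can represent the sum in at most 4 characters.
--
--     Args:
--     total_sum (int): The sum of numbers in base-10
--
--     Returns:
--     int: The smallest base that can represent the sum in at most 4 characters
--     """
--
--     # Binary search approach is more efficient here
--     left, right = 2, 100000
--     while left < right:
--         mid = (left + right) // 2
--         base_representation = convert_to_base_n(total_sum, mid)
--
--         if len(base_representation) <= 4:
--             right = mid
--         else:
--             left = mid + 1
--
--     return left
-- ===== SOURCE B (Python) =====
-- def find_smallest_base(total_sum: int) -> int: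
--     # A number fits in at most four digits of base b exactly when b**4 > total_sum,
--     # so just scan for the smallest such base (capped at 100000) -- no base
--     # conversion and no binary search needed.
--     if total_sum <= 0:
--         return 2
--     b = 2
--     while b < 100000 and b ** 4 <= total_sum:
--         b += 1
--     return b
-- ===== Notes on version B (the rewrite author's own statement) =====
-- stated objective: simpler
-- what changed: Replaces the binary search over string lengths of hand-rolled base conversions with a direct scan for the smallest base whose fourth power exceeds total_sum (the closed-form 'at most four characters' condition), with no conversion routine at all.
import Mathlib
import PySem

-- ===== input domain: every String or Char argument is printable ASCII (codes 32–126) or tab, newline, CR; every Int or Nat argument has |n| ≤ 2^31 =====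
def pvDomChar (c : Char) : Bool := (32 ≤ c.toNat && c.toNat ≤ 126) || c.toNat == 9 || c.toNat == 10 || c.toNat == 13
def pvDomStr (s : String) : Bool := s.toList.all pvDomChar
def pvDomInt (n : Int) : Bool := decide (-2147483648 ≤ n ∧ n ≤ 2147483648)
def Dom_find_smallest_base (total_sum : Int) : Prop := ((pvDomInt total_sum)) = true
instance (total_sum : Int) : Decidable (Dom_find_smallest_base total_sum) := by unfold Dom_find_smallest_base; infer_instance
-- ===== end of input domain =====

-- B replaces A's binary search over lengths of hand-rolled base conversions by a direct
-- scan for the smallest base whose fourth power exceeds total_sum (simpler; same results).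

-- ===== PORT A =====

-- generate_digit: the ordered range->function dict becomes the same ordered case chain
def generate_digit (value : Int) : Char :=
  if 0 ≤ value ∧ value < 10 then Char.ofNat (48 + value.toNat)          -- str(v)
  else if 10 ≤ value ∧ value < 36 then Char.ofNat (value.toNat - 10 + 65)
  else if 36 ≤ value ∧ value < 62 then Char.ofNat (value.toNat - 36 + 97)
  else if 62 ≤ value ∧ value < 68 then ['!','@','#','$','%','^'].getD (value.toNat - 62) ' '
  else Char.ofNat value.toNat                                            -- chr(value)

-- the `while number > 0` digit loop; collects digits least-significant first (as the
-- Python list does).  The `2 ≤ base` conjunct is only the totality guard: every call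
-- from convert_to_base_n has base ≥ 2 (a smaller base raises before the loop).
def convLoop (number base : Int) : List Char :=
  if _h : 0 < number ∧ 2 ≤ base then
    generate_digit (PySem.Int.mod number base) ::
      convLoop (PySem.Int.floordiv number base) base
  else []
termination_by number.toNat
decreasing_by
  have h3 : PySem.Int.floordiv number base < number := by
    rw [PySem.Int.floordiv_lt_iff_lt_mul (by omega)]
    nlinarith
  omega

def convert_to_base_n (number base : Int) : String :=
  if base < 2 ∨ base > 100000 then ""        -- Python raises ValueError here; unreachable from find_smallest_base (mid ∈ [2,100000])
  else if number = 0 then "0"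
  else String.ofList (convLoop number base).reverse   -- ''.join(reversed(base_n_digits))

-- the binary-search while loop
def bsLoop (total_sum left right : Int) : Int :=
  if h : left < right then
    let mid := PySem.Int.floordiv (left + right) 2
    if PySem.Str.len (convert_to_base_n total_sum mid) ≤ 4 then
      bsLoop total_sum left mid
    else
      bsLoop total_sum (mid + 1) right
  else left
termination_by (right - left).toNat
decreasing_by
  all_goals
    have hb := PySem.Int.floordiv_two_mid_bounds (le_of_lt h)
    have hlt : PySem.Int.floordiv (left + right) 2 < right := by
      rw [PySem.Int.floordiv_lt_iff_lt_mul (by omega)]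
      omega
    omega

def find_smallest_base (total_sum : Int) : Int :=
  bsLoop total_sum 2 100000

-- ===== PORT B =====

-- the `while b < 100000 and b ** 4 <= total_sum: b += 1` loop
def altLoop (total_sum b : Int) : Int :=
  if h : b < 100000 ∧ b ^ 4 ≤ total_sum then altLoop total_sum (b + 1) else b
termination_by (100000 - b).toNat
decreasing_by omega

def find_smallest_base_alt (total_sum : Int) : Int :=
  if total_sum ≤ 0 then 2 else altLoop total_sum 2

-- ===== PRECONDITION & SPEC =====
def Spec_find_smallest_base (total_sum : Int) (out : Int) : Prop := out = find_smallest_base_alt total_sum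
instance (total_sum : Int) (out : Int) : Decidable (Spec_find_smallest_base total_sum out) := by unfold Spec_find_smallest_base; infer_instance

-- ===== CLAIM (what is proved, stated in full; the proofs are below) =====
def Claim_equal_find_smallest_base : Prop := ∀ (total_sum : Int), Dom_find_smallest_base total_sum → Spec_find_smallest_base total_sum (find_smallest_base total_sum)

-- ===== LEMMAS AND PROOFS =====

-- digit-count characterisation: for base ≥ 2 and n ≥ 0, the loop emits ≤ k digits iff n < base^k
theorem convLoop_len_le_iff : ∀ (n base : Int), 2 ≤ base → 0 ≤ n →
    ∀ (k : Nat), ((convLoop n base).length ≤ k ↔ n < base ^ k) := by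
  intro n base
  induction n using convLoop.induct (base := base) with
  | case1 n h ih =>
    intro hb hn k
    have hfd : 0 ≤ PySem.Int.floordiv n base := by
      rw [PySem.Int.le_floordiv_iff_mul_le (by omega)]; omega
    rw [convLoop, dif_pos h]
    cases k with
    | zero =>
      simp only [pow_zero, List.length_cons]
      omega
    | succ k =>
      have h1 := ih hb hfd k
      have h2 : PySem.Int.floordiv n base < base ^ k ↔ n < base ^ k * base :=
        PySem.Int.floordiv_lt_iff_lt_mul (by omega)
      rw [pow_succ, ← h2, ← h1]
      simp only [List.length_cons]
      omega
  | case2 n h =>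
    intro hb hn k
    rw [convLoop, dif_neg h]
    have hn0 : n = 0 := by omega
    exact ⟨fun _ => by rw [hn0]; exact pow_pos (by omega) k, fun _ => by simp⟩

theorem conv_len_le_iff (ts b : Int) (hts : 0 < ts) (hb : 2 ≤ b) (hb' : b ≤ 100000) :
    (PySem.Str.len (convert_to_base_n ts b) ≤ 4 ↔ ts < b ^ 4) := by
  rw [convert_to_base_n, if_neg (by omega), if_neg (by omega)]
  rw [← convLoop_len_le_iff ts b hb (by omega) 4]
  simp [PySem.Str.len]

theorem conv_len_nonpos (ts b : Int) (hts : ts ≤ 0) (hb : 2 ≤ b) (hb' : b ≤ 100000) :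
    PySem.Str.len (convert_to_base_n ts b) ≤ 4 := by
  rw [convert_to_base_n, if_neg (by omega)]
  by_cases h0 : ts = 0
  · rw [if_pos h0]; decide
  · rw [if_neg h0, convLoop, dif_neg (by omega)]
    simp [PySem.Str.len]

-- the binary search with a threshold predicate returns the threshold clamped to [left,right]
theorem bsLoop_eq : ∀ (ts l r : Int) (T : Int), l ≤ r →
    (∀ b, l ≤ b → b ≤ r → (PySem.Str.len (convert_to_base_n ts b) ≤ 4 ↔ T ≤ b)) →
    bsLoop ts l r = max l (min r T) := by
  intro ts l r
  induction l, r using bsLoop.induct (total_sum := ts) with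
  | case1 l r h mid hP ih =>
    intro T hlr hiff
    have hmid := PySem.Int.floordiv_two_mid_bounds (le_of_lt h)
    have hmlt : PySem.Int.floordiv (l + r) 2 < r := by
      rw [PySem.Int.floordiv_lt_iff_lt_mul (by omega)]; omega
    rw [bsLoop, dif_pos h, if_pos hP]
    have hTmid : T ≤ PySem.Int.floordiv (l + r) 2 :=
      (hiff _ (by omega) (by omega)).mp hP
    rw [ih T (by omega) (fun b hb hb' => hiff b hb (by omega))]
    omega
  | case2 l r h mid hP ih =>
    intro T hlr hiff
    have hmid := PySem.Int.floordiv_two_mid_bounds (le_of_lt h)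
    have hmlt : PySem.Int.floordiv (l + r) 2 < r := by
      rw [PySem.Int.floordiv_lt_iff_lt_mul (by omega)]; omega
    rw [bsLoop, dif_pos h, if_neg hP]
    have hTmid : ¬ T ≤ PySem.Int.floordiv (l + r) 2 :=
      fun hc => hP ((hiff _ (by omega) (by omega)).mpr hc)
    rw [ih T (by omega) (fun b hb hb' => hiff b (by omega) hb')]
    omega
  | case3 l r h =>
    intro T hlr hiff
    rw [bsLoop, dif_neg h]
    omega

-- B's scan: starting at b with everything below b failing, it returns the least base
-- whose 4th power exceeds ts (ts < 100000^4 keeps the cap from binding)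
theorem altLoop_spec : ∀ (ts b : Int), ts < 100000 ^ 4 → 2 ≤ b → b ≤ 100000 →
    (∀ c, 2 ≤ c → c < b → c ^ 4 ≤ ts) →
    2 ≤ altLoop ts b ∧ altLoop ts b ≤ 100000 ∧ ts < (altLoop ts b) ^ 4 ∧
      (∀ c, 2 ≤ c → c < altLoop ts b → c ^ 4 ≤ ts) := by
  intro ts b
  induction b using altLoop.induct (total_sum := ts) with
  | case1 b h ih =>
    intro hcap hb2 hb1e5 hbelow
    rw [altLoop, dif_pos h]
    refine ih hcap (by omega) (by omega) ?_
    intro c hc2 hclt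
    by_cases hcb : c = b
    · rw [hcb]; exact h.2
    · exact hbelow c hc2 (by omega)
  | case2 b h =>
    intro hcap hb2 hb1e5 hbelow
    rw [altLoop, dif_neg h]
    refine ⟨hb2, hb1e5, ?_, hbelow⟩
    by_cases hle : b ^ 4 ≤ ts
    · have hb : b = 100000 := by omega
      rw [hb] at hle
      omega
    · omega

theorem main_eq (ts : Int) (hdom : Dom_find_smallest_base ts) :
    find_smallest_base ts = find_smallest_base_alt ts := by
  have hcap : ts < 100000 ^ 4 := by
    unfold Dom_find_smallest_base pvDomInt at hdom
    simp only [decide_eq_true_eq] at hdom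
    have : (100000:Int) ^ 4 = 100000000000000000000 := by norm_num
    omega
  by_cases hts : ts ≤ 0
  · have hbs := bsLoop_eq ts 2 100000 2 (by omega)
      (fun b hb hb' => ⟨fun _ => hb, fun _ => conv_len_nonpos ts b hts hb hb'⟩)
    unfold find_smallest_base find_smallest_base_alt
    rw [hbs, if_pos hts]
    decide
  · replace hts : 0 < ts := by omega
    obtain ⟨hT2, hT1e5, hTgt, hTbelow⟩ :=
      altLoop_spec ts 2 hcap (by omega) (by omega) (fun c hc2 hclt => by omega)
    have hbs := bsLoop_eq ts 2 100000 (altLoop ts 2) (by omega) (fun b hb hb' => by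
      rw [conv_len_le_iff ts b hts hb hb']
      constructor
      · intro hlt
        by_contra hc
        have := hTbelow b hb (by omega)
        omega
      · intro hTb
        have hmono : (altLoop ts 2) ^ 4 ≤ b ^ 4 := by
          apply pow_le_pow_left₀ (by omega) hTb
        omega)
    unfold find_smallest_base find_smallest_base_alt
    rw [hbs, if_neg (by omega)]
    omega

-- ===== VERDICT (by name: the statement is the Claim_ definition above) =====
theorem find_smallest_base_spec : Claim_equal_find_smallest_base := by
  intro ts hdom
  unfold Spec_find_smallest_base
  exact main_eq ts hdom
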